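-- pv_equiv track=rewrite | github.com/codybingham/drawingCompiler | automated/AutomatedpdfCombiner_v1.0.0.py | build_effective_page_map
-- ===== SOURCE A (Python) =====
-- def build_effective_page_map(toc_entries, direct_page_map):
--     children_map = {i: [] for i in range(len(toc_entries))}
--     for i, entry in enumerate(toc_entries):
--         parent_index = entry.get("parent_index")
--         if parent_index is not None:
--             children_map[parent_index].append(i)
--
--     effective = list(direct_page_map)  # copy; None entries will be filled in
--
--     # Post-order iterative traversal so each parent is resolved after its children
--     # Identify roots (no parent)
--     roots = [i for i, e in enumerate(toc_entries) if e.get("parent_index") is None]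
--
--     visit_order = []
--     stack = list(roots)
--     while stack:
--         idx = stack.pop()
--         visit_order.append(idx)
--         stack.extend(children_map[idx])
--
--     # Process in reverse (children before parents)
--     for idx in reversed(visit_order):
--         if effective[idx] is not None:
--             continue
--         for child_index in children_map[idx]:
--             if effective[child_index] is not None:
--                 effective[idx] = effective[child_index]
--                 break
--
--     return effective
-- ===== SOURCE B (Python) =====
-- def build_effective_page_map(toc_entries, direct_page_map):
--     n = len(toc_entries)
--     kids = [[] for _ in range(n)]
--     roots = []
--     for j in range(n):
--         p = toc_entries[j].get("parent_index")
--         if p is None: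
--             roots.append(j)
--         else:
--             kids[p].append(j)
--
--     effective = list(direct_page_map)
--
--     def resolve(idx):
--         for c in kids[idx]:
--             resolve(c)
--         if effective[idx] is None:
--             val = next((effective[c] for c in kids[idx] if effective[c] is not None), None)
--             if val is not None:
--                 effective[idx] = val
--
--     for r in roots:
--         resolve(r)
--     return effective
-- ===== Notes on version B (the rewrite author's own statement) =====
-- stated objective: alternative
-- what changed: Replaces A's explicit-stack traversal that records a visit_order list plus a separate reversed fill pass (and its dict children map) with a single pass building per-index child lists and a recursive post-order resolve(idx) seeded from the roots that fills each node from its first resolved child directly, so no visit_order list or reversal exists.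
-- outside the precondition, e.g. on build_effective_page_map([{'parent_index': 0}], []): A returns [], B returns []
import Mathlib
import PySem

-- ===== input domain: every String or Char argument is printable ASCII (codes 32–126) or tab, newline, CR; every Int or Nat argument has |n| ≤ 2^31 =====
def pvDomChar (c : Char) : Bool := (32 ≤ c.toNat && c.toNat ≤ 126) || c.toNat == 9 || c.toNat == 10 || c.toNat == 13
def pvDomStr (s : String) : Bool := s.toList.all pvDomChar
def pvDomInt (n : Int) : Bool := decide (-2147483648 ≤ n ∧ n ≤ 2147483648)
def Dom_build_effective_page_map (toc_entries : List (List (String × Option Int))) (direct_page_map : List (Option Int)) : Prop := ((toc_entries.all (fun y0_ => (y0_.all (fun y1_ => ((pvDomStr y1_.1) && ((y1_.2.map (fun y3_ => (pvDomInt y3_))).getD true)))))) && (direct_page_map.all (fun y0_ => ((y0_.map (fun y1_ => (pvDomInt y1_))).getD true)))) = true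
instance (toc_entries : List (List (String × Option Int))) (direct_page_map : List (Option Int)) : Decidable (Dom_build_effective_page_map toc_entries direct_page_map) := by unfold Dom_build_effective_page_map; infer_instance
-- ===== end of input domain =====

-- B replaces A's explicit-stack traversal + visit_order list + reversed fill pass by one
-- root-seeded recursive post-order resolve that fills each node from its first resolved
-- child directly (different decomposition, same cost).

-- ===== PORT A =====

-- entry.get("parent_index"): first-match lookup, a present None value and a missing key both give None
def pvParent (e : List (String × Option Int)) : Option Int :=
  ((PySem.Dict.mk e).get? "parent_index").join

-- children_map: the Python dict {0..n-1 ↦ []} with appends, modelled as a total index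
-- function (exact under Pre_, where every present parent_index is one of the seeded keys 0..n-1)
def pvChildA (toc_entries : List (List (String × Option Int))) : Int → List Int :=
  (PySem.List.enumerate toc_entries).foldl
    (fun m ie => match pvParent ie.2 with
      | some p => fun k => if k = p then m k ++ [ie.1] else m k
      | none => m)
    (fun _ => [])

-- roots = [i for i, e in enumerate(toc_entries) if e.get("parent_index") is None]
def pvRootsA (toc_entries : List (List (String × Option Int))) : List Int :=
  (PySem.List.enumerate toc_entries).filterMap
    (fun ie => if pvParent ie.2 = none then some ie.1 else none)

-- the while-stack loop; the stack is held top-first (Python pops from the end and extends at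
-- the end, so extend pushes the children with the FIRST child deepest); one unit of fuel per
-- pop — every node is popped at most once, so length+1 units never run out
def pvDFSA (cm : Int → List Int) : Nat → List Int → List Int → List Int
  | 0, _, vo => vo
  | _+1, [], vo => vo
  | f+1, idx :: stk, vo => pvDFSA cm f ((cm idx).reverse ++ stk) (vo ++ [idx])

-- the inner 'for child_index in children_map[idx]: … break' loop
def pvFillScanA (eff : List (Option Int)) (idx : Int) : List Int → List (Option Int)
  | [] => eff
  | c :: cs => match PySem.List.pyGet? eff c with
    | some (some v) => PySem.List.pySetD eff idx (some v)
    | _ => pvFillScanA eff idx cs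

-- one step of 'for idx in reversed(visit_order)'; pyGet? none (Python IndexError) lies outside Pre_
def pvFillA (cm : Int → List Int) (eff : List (Option Int)) (idx : Int) : List (Option Int) :=
  match PySem.List.pyGet? eff idx with
  | some (some _) => eff
  | _ => pvFillScanA eff idx (cm idx)

def build_effective_page_map (toc_entries : List (List (String × Option Int))) (direct_page_map : List (Option Int)) : List (Option Int) :=
  let cm := pvChildA toc_entries
  let roots := pvRootsA toc_entries
  let vo := pvDFSA cm (toc_entries.length + 1) roots.reverse []
  vo.reverse.foldl (fun eff idx => pvFillA cm eff idx) direct_page_map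

-- ===== PORT B =====

-- toc_entries[j].get("parent_index")
def pvParentAt (toc_entries : List (List (String × Option Int))) (j : Int) : Option Int :=
  (PySem.List.pyGet? toc_entries j).bind pvParent

-- the single 'for j in range(n)' pass building (kids, roots); kids is the Python list of
-- lists indexed by parent, modelled as a total index function (exact under Pre_: 0 ≤ parent < n)
def pvScanB (toc_entries : List (List (String × Option Int))) : (Int → List Int) × List Int :=
  (PySem.List.pyRange 0 (PySem.List.len toc_entries) 1).foldl
    (fun st j => match pvParentAt toc_entries j with
      | none => (st.1, st.2 ++ [j])
      | some p => ((fun k => if k = p then st.1 k ++ [j] else st.1 k), st.2))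
    ((fun _ => []), [])

-- next((effective[c] for c in kids[idx] if effective[c] is not None), None)
def pvFirstB (eff : List (Option Int)) : List Int → Option Int
  | [] => none
  | c :: cs => match PySem.List.pyGet? eff c with
    | some (some v) => some v
    | _ => pvFirstB eff cs

-- resolve(idx); one unit of fuel per recursion level — the recursion depth is at most the
-- number of nodes, so length+1 units never run out
def pvResolveB (kids : Int → List Int) : Nat → Int → List (Option Int) → List (Option Int)
  | 0, _, eff => eff
  | f+1, idx, eff =>
    let eff1 := (kids idx).foldl (fun e c => pvResolveB kids f c e) eff
    match PySem.List.pyGet? eff1 idx with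
    | some (some _) => eff1
    | _ => match pvFirstB eff1 (kids idx) with
      | some v => PySem.List.pySetD eff1 idx (some v)
      | none => eff1

def build_effective_page_map_alt (toc_entries : List (List (String × Option Int))) (direct_page_map : List (Option Int)) : List (Option Int) :=
  let s := pvScanB toc_entries
  s.2.foldl (fun eff r => pvResolveB s.1 (toc_entries.length + 1) r eff) direct_page_map

-- ===== PRECONDITION & SPEC =====
-- Python A raises KeyError when some entry's parent_index is not one of the seeded keys
-- 0..n-1, and IndexError when the fill loop reads effective[idx] past the end of the page
-- map; the second clause over-excludes the inputs whose out-of-range indices are never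
-- visited (a reachability condition, not closed-form), on which A returns the map unchanged.
def Pre_build_effective_page_map (toc_entries : List (List (String × Option Int))) (direct_page_map : List (Option Int)) : Prop :=
  (∀ e ∈ toc_entries, ∀ p ∈ pvParent e, 0 ≤ p ∧ p < (toc_entries.length : Int)) ∧
  toc_entries.length ≤ direct_page_map.length

instance (toc_entries : List (List (String × Option Int))) (direct_page_map : List (Option Int)) : Decidable (Pre_build_effective_page_map toc_entries direct_page_map) := by
  unfold Pre_build_effective_page_map; infer_instance

def pvWitness_build_effective_page_map : (List (List (String × Option Int))) × List (Option Int) :=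
  ([[("parent_index", none)], [("parent_index", some 0)]], [none, some 3])

def Spec_build_effective_page_map (toc_entries : List (List (String × Option Int))) (direct_page_map : List (Option Int)) (out : List (Option Int)) : Prop := out = build_effective_page_map_alt toc_entries direct_page_map
instance (toc_entries : List (List (String × Option Int))) (direct_page_map : List (Option Int)) (out : List (Option Int)) : Decidable (Spec_build_effective_page_map toc_entries direct_page_map out) := by unfold Spec_build_effective_page_map; infer_instance

-- ===== CLAIM (what is proved, stated in full; the proofs are below) =====
def Claim_equal_build_effective_page_map : Prop := ∀ (toc_entries : List (List (String × Option Int))) (direct_page_map : List (Option Int)), Dom_build_effective_page_map toc_entries direct_page_map → Pre_build_effective_page_map toc_entries direct_page_map → Spec_build_effective_page_map toc_entries direct_page_map (build_effective_page_map toc_entries direct_page_map)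

-- ===== LEMMAS AND PROOFS =====

-- the canonical child list / root list both scans compute
def chSpec (toc_entries : List (List (String × Option Int))) (i : Int) : List Int :=
  (PySem.List.pyRange 0 (toc_entries.length : Int) 1).filter (fun j => pvParentAt toc_entries j == some i)

def rootsSpec (toc_entries : List (List (String × Option Int))) : List Int :=
  (PySem.List.pyRange 0 (toc_entries.length : Int) 1).filter (fun j => pvParentAt toc_entries j == none)

theorem parentAt_mem_pyRange (toc : List (List (String × Option Int))) {j : Int}
    (hj : j ∈ PySem.List.pyRange 0 (toc.length : Int) 1) :
    pvParent (PySem.List.pyGetD toc j []) = pvParentAt toc j := by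
  have h := (PySem.List.mem_pyRange_one).1 hj
  unfold pvParentAt
  rw [PySem.List.pyGet?_eq_some_getElem toc h.1 h.2,
      PySem.List.pyGetD_eq_getElem toc [] h.1 h.2]
  rfl

theorem foldA_general (L : List (Int × List (String × Option Int))) :
    ∀ (m : Int → List Int) (i : Int),
    (L.foldl (fun m ie => match pvParent ie.2 with
        | some p => fun k => if k = p then m k ++ [ie.1] else m k
        | none => m) m) i
    = m i ++ ((L.filter (fun ie => pvParent ie.2 == some i)).map (·.1)) := by
  induction L with
  | nil => intro m i; simp
  | cons a L ih =>
    intro m i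
    simp only [List.foldl_cons, List.filter_cons]
    cases h : pvParent a.2 with
    | none => simp [ih]
    | some p =>
      by_cases hip : p = i
      · subst hip
        simp only [beq_iff_eq, ih]
        simp
      · have hb : (some p == some i) = false := by simp [hip]
        simp only [hb, Bool.false_eq_true, if_false, ih]
        simp [Ne.symm hip]

theorem childA_eq (toc : List (List (String × Option Int))) :
    pvChildA toc = fun i => chSpec toc i := by
  funext i
  unfold pvChildA
  rw [foldA_general]
  rw [PySem.List.enumerate_eq_map_pyRange toc ([] : List (String × Option Int)), List.filter_map]
  unfold chSpec
  rw [List.map_map, PySem.List.len_eq]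
  rw [List.filter_congr (fun j hj => by
    simp only [Function.comp_apply]
    rw [parentAt_mem_pyRange toc hj])]
  exact List.map_id _

theorem rootsA_eq (toc : List (List (String × Option Int))) :
    pvRootsA toc = rootsSpec toc := by
  unfold pvRootsA
  rw [PySem.List.enumerate_eq_map_pyRange toc ([] : List (String × Option Int)),
      List.filterMap_map, PySem.List.len_eq]
  unfold rootsSpec
  rw [← List.filterMap_eq_filter]
  apply List.filterMap_congr
  intro j hj
  simp only [Function.comp_apply, Option.guard]
  rw [parentAt_mem_pyRange toc hj]
  by_cases h : pvParentAt toc j = none <;> simp [h]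

theorem foldB_general (toc : List (List (String × Option Int))) (L : List Int) :
    ∀ (st : (Int → List Int) × List Int),
    (L.foldl (fun st j => match pvParentAt toc j with
        | none => (st.1, st.2 ++ [j])
        | some p => ((fun k => if k = p then st.1 k ++ [j] else st.1 k), st.2)) st)
    = ((fun k => st.1 k ++ (L.filter (fun j => pvParentAt toc j == some k))),
       st.2 ++ (L.filter (fun j => pvParentAt toc j == none))) := by
  induction L with
  | nil => intro st; simp
  | cons a L ih =>
    intro st
    simp only [List.foldl_cons, List.filter_cons]
    cases h : pvParentAt toc a with
    | none => rw [ih]; simp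
    | some p =>
      rw [ih]
      refine Prod.ext ?_ (by simp)
      funext k
      by_cases hkp : p = k
      · subst hkp; simp
      · have hb : (some p == some k) = false := by simp [hkp]
        simp [hb, Ne.symm hkp]

theorem scanB_eq (toc : List (List (String × Option Int))) :
    pvScanB toc = (fun i => chSpec toc i, rootsSpec toc) := by
  unfold pvScanB
  rw [PySem.List.len_eq, foldB_general]
  refine Prod.ext ?_ (by simp [rootsSpec])
  funext k
  simp [chSpec]

theorem mem_chSpec {toc : List (List (String × Option Int))} {i c : Int} :
    c ∈ chSpec toc i ↔ (0 ≤ c ∧ c < (toc.length : Int)) ∧ pvParentAt toc c = some i := by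
  simp [chSpec, List.mem_filter, PySem.List.mem_pyRange_one]

theorem mem_rootsSpec {toc : List (List (String × Option Int))} {c : Int} :
    c ∈ rootsSpec toc ↔ (0 ≤ c ∧ c < (toc.length : Int)) ∧ pvParentAt toc c = none := by
  simp [rootsSpec, List.mem_filter, PySem.List.mem_pyRange_one]

theorem nodup_chSpec (toc : List (List (String × Option Int))) (i : Int) :
    (chSpec toc i).Nodup := (PySem.List.nodup_pyRange_one _ _).filter _

theorem nodup_rootsSpec (toc : List (List (String × Option Int))) :
    (rootsSpec toc).Nodup := (PySem.List.nodup_pyRange_one _ _).filter _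

-- ancestor chains: AChain i C means C is the (unique) strictly ascending parent chain of i ending at a root
def AChain (toc : List (List (String × Option Int))) : Int → List Int → Prop
  | i, [] => pvParentAt toc i = none
  | i, p :: ps => pvParentAt toc i = some p ∧ AChain toc p ps

def PreP (toc : List (List (String × Option Int))) : Prop :=
  ∀ e ∈ toc, ∀ p ∈ pvParent e, 0 ≤ p ∧ p < (toc.length : Int)

theorem chain_unique {toc : List (List (String × Option Int))} :
    ∀ {C C' : List Int} {x : Int}, AChain toc x C → AChain toc x C' → C = C' := by
  intro C
  induction C with
  | nil =>
    intro C' x h h'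
    cases C' with
    | nil => rfl
    | cons q qs =>
      exact absurd (h ▸ h'.1) (by simp)
  | cons p ps ih =>
    intro C' x h h'
    cases C' with
    | nil => exact absurd (h'.symm ▸ h.1) (by simp)
    | cons q qs =>
      have hpq : p = q := Option.some.inj (h.1.symm.trans h'.1)
      subst hpq
      rw [ih h.2 h'.2]

theorem chain_suffix {toc : List (List (String × Option Int))} :
    ∀ {C1 C2 : List Int} {x p : Int}, AChain toc x (C1 ++ p :: C2) → AChain toc p C2 := by
  intro C1
  induction C1 with
  | nil => intro C2 x p h; exact h.2
  | cons a as ih => intro C2 x p h; exact ih h.2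

theorem chain_not_mem {toc : List (List (String × Option Int))}
    {C : List Int} {x : Int} (h : AChain toc x C) : x ∉ C := by
  intro hx
  obtain ⟨C1, C2, rfl⟩ := List.append_of_mem hx
  have h2 : AChain toc x C2 := chain_suffix h
  have hlen := congrArg List.length (chain_unique h h2)
  simp [List.length_append] at hlen
  omega

theorem chain_nodup {toc : List (List (String × Option Int))} :
    ∀ {C : List Int} {x : Int}, AChain toc x C → (x :: C).Nodup := by
  intro C
  induction C with
  | nil => intro x _; simp
  | cons p ps ih =>
    intro x h
    refine List.nodup_cons.2 ⟨chain_not_mem h, ih h.2⟩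
    

theorem parentAt_bounds {toc : List (List (String × Option Int))} (hP : PreP toc)
    {x p : Int} (h : pvParentAt toc x = some p) : 0 ≤ p ∧ p < (toc.length : Int) := by
  unfold pvParentAt at h
  rcases Option.bind_eq_some_iff.1 h with ⟨e, he, hpe⟩
  exact hP e (PySem.List.mem_of_pyGet?_eq_some _ he) p hpe

theorem chain_bounds {toc : List (List (String × Option Int))} (hP : PreP toc) :
    ∀ {C : List Int} {x : Int}, AChain toc x C → ∀ y ∈ C, 0 ≤ y ∧ y < (toc.length : Int) := by
  intro C
  induction C with
  | nil => intro x _ y hy; cases hy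
  | cons p ps ih =>
    intro x h y hy
    rcases List.mem_cons.1 hy with rfl | hy
    · exact parentAt_bounds hP h.1
    · exact ih h.2 y hy

theorem chain_len {toc : List (List (String × Option Int))} (hP : PreP toc)
    {C : List Int} {x : Int} (hC : AChain toc x C) (hx : 0 ≤ x ∧ x < (toc.length : Int)) :
    (x :: C).length ≤ toc.length := by
  have hnd : (x :: C).Nodup := chain_nodup hC
  have hsub : (x :: C) ⊆ PySem.List.pyRange 0 (toc.length : Int) 1 := by
    intro y hy
    rcases List.mem_cons.1 hy with rfl | hy
    · exact PySem.List.mem_pyRange_one.2 (by simpa using hx)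
    · exact PySem.List.mem_pyRange_one.2 (by simpa using chain_bounds hP hC y hy)
  have := (hnd.subperm hsub).length_le
  simpa [PySem.List.length_pyRange_one] using this

-- fuel irrelevance of resolve: any fuel ≥ n - |chain| computes the same result
theorem resolve_fuel {toc : List (List (String × Option Int))} (hP : PreP toc) :
    ∀ (f : Nat), ∀ (g : Nat) (i : Int) (C : List Int) (eff : List (Option Int)),
      AChain toc i C → (0 ≤ i ∧ i < (toc.length : Int)) →
      toc.length ≤ f + C.length → toc.length ≤ g + C.length →
      pvResolveB (fun k => chSpec toc k) f i eff = pvResolveB (fun k => chSpec toc k) g i eff := by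
  intro f
  induction f using Nat.strong_induction_on with
  | _ f ih =>
    intro g i C eff hC hi hf hg
    have hlen := chain_len hP hC hi
    simp only [List.length_cons] at hlen
    match f, g with
    | 0, _ => omega
    | _+1, 0 => omega
    | f'+1, g'+1 =>
      simp only [pvResolveB]
      have hfold : (chSpec toc i).foldl (fun e c => pvResolveB (fun k => chSpec toc k) f' c e) eff
          = (chSpec toc i).foldl (fun e c => pvResolveB (fun k => chSpec toc k) g' c e) eff := by
        refine PySem.List.foldl_congr_mem _ _ _ _ ?_
        intro e c hc
        have hm := mem_chSpec.1 hc
        exact ih f' (Nat.lt_succ_self _) g' c (i :: C) e ⟨hm.2, hC⟩ hm.1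
          (by simp; omega) (by simp; omega)
      rw [hfold]

-- the justification invariant of A's stack machine
def UJust (toc : List (List (String × Option Int))) : List Int → Prop
  | [] => True
  | u :: us => (pvParentAt toc u = none ∨ ∃ q ∈ us, pvParentAt toc u = some q) ∧ UJust toc us

def Justified (toc : List (List (String × Option Int))) (U : List Int) (x : Int) : Prop :=
  pvParentAt toc x = none ∨ ∃ q ∈ U, pvParentAt toc x = some q

def StackInv (toc : List (List (String × Option Int))) (S U : List Int) : Prop :=
  (U ++ S).Nodup ∧ (∀ x ∈ U ++ S, 0 ≤ x ∧ x < (toc.length : Int)) ∧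
  UJust toc U ∧ (∀ s ∈ S, Justified toc U s)

theorem ujust_suffix {toc : List (List (String × Option Int))} :
    ∀ {U1 U2 : List Int}, UJust toc (U1 ++ U2) → UJust toc U2 := by
  intro U1
  induction U1 with
  | nil => intro U2 h; exact h
  | cons a as ih => intro U2 h; exact ih h.2

theorem chain_exists_aux {toc : List (List (String × Option Int))} :
    ∀ (N : Nat) (U : List Int), U.length ≤ N → UJust toc U →
      ∀ x, Justified toc U x → ∃ C, AChain toc x C := by
  intro N
  induction N with
  | zero =>
    intro U hU _ x hx
    have : U = [] := List.length_eq_zero_iff.1 (Nat.le_zero.1 hU)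
    subst this
    rcases hx with h | ⟨q, hq, _⟩
    · exact ⟨[], h⟩
    · cases hq
  | succ N ih =>
    intro U hU hJ x hx
    rcases hx with h | ⟨q, hq, hxq⟩
    · exact ⟨[], h⟩
    · obtain ⟨U1, U2, rfl⟩ := List.append_of_mem hq
      have hJ2 : UJust toc (q :: U2) := ujust_suffix hJ
      have hlen : U2.length ≤ N := by
        simp [List.length_append] at hU
        omega
      obtain ⟨Cq, hCq⟩ := ih U2 hlen hJ2.2 q hJ2.1
      exact ⟨q :: Cq, ⟨hxq, hCq⟩⟩

theorem chain_exists {toc : List (List (String × Option Int))} :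
    ∀ (U : List Int), UJust toc U → ∀ x, Justified toc U x → ∃ C, AChain toc x C :=
  fun U hJ x hx => chain_exists_aux U.length U le_rfl hJ x hx

-- accumulator form of the stack machine
theorem dfsA_acc (cm : Int → List Int) :
    ∀ (f : Nat) (S vo : List Int), pvDFSA cm f S vo = vo ++ pvDFSA cm f S [] := by
  intro f
  induction f with
  | zero => intro S vo; simp [pvDFSA]
  | succ f ih =>
    intro S vo
    cases S with
    | nil => simp [pvDFSA]
    | cons i stk =>
      simp only [pvDFSA]
      rw [ih _ (vo ++ [i]), ih _ ([] ++ [i])]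
      simp

-- A's inner break-loop computes exactly "set to the first child value, if any"
theorem fillScan_eq (eff : List (Option Int)) (idx : Int) :
    ∀ (l : List Int), pvFillScanA eff idx l =
      (match pvFirstB eff l with
       | some v => PySem.List.pySetD eff idx (some v)
       | none => eff) := by
  intro l
  induction l with
  | nil => simp [pvFillScanA, pvFirstB]
  | cons c cs ih =>
    simp only [pvFillScanA, pvFirstB]
    cases h : PySem.List.pyGet? eff c with
    | none => exact ih
    | some v => cases v with
      | none => exact ih
      | some w => rfl

-- the crux: A's reverse-order fill over the machine's visit order is B's recursive resolve
theorem ulen_le {toc : List (List (String × Option Int))} {U : List Int}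
    (hnd : U.Nodup) (hb : ∀ x ∈ U, 0 ≤ x ∧ x < (toc.length : Int)) : U.length ≤ toc.length := by
  have hsub : U ⊆ PySem.List.pyRange 0 (toc.length : Int) 1 := fun y hy =>
    PySem.List.mem_pyRange_one.2 (by simpa using hb y hy)
  have := (hnd.subperm hsub).length_le
  simpa [PySem.List.length_pyRange_one] using this

theorem kids_fresh {toc : List (List (String × Option Int))} {i : Int} {stk U : List Int}
    (hInv : StackInv toc (i :: stk) U) : ∀ c ∈ chSpec toc i, c ∉ (i :: U) ∧ c ∉ stk := by
  obtain ⟨hnd, _hb, hJU, hJS⟩ := hInv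
  have hndm : (i :: (U ++ stk)).Nodup := List.nodup_middle.1 hnd
  have hiUS : i ∉ U ++ stk := (List.nodup_cons.1 hndm).1
  intro c hc
  have hpc : pvParentAt toc c = some i := (mem_chSpec.1 hc).2
  have hiU : i ∉ U := fun h => hiUS (List.mem_append.2 (Or.inl h))
  have hci : c ≠ i := by
    rintro rfl
    rcases hJS c List.mem_cons_self with h | ⟨q, hq, hcq⟩
    · rw [hpc] at h; cases h
    · rw [hpc] at hcq; exact hiU (Option.some.inj hcq ▸ hq)
  have hcU : c ∉ U := by
    intro hcU
    obtain ⟨U1, U2, rfl⟩ := List.append_of_mem hcU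
    have hJ2 : UJust toc (c :: U2) := ujust_suffix hJU
    rcases hJ2.1 with h | ⟨q, hq, hcq⟩
    · rw [hpc] at h; cases h
    · rw [hpc] at hcq
      have : i ∈ U2 := Option.some.inj hcq ▸ hq
      exact hiU (List.mem_append.2 (Or.inr (List.mem_cons.2 (Or.inr this))))
  have hcstk : c ∉ stk := by
    intro hcs
    rcases hJS c (List.mem_cons.2 (Or.inr hcs)) with h | ⟨q, hq, hcq⟩
    · rw [hpc] at h; cases h
    · rw [hpc] at hcq; exact hiU (Option.some.inj hcq ▸ hq)
  exact ⟨fun h => (List.mem_cons.1 h).elim hci hcU, hcstk⟩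

theorem inv_step {toc : List (List (String × Option Int))} {i : Int} {stk U : List Int}
    (hInv : StackInv toc (i :: stk) U) :
    StackInv toc ((chSpec toc i).reverse ++ stk) (i :: U) := by
  obtain ⟨hnd, hb, hJU, hJS⟩ := hInv
  have hfresh := kids_fresh ⟨hnd, hb, hJU, hJS⟩
  have hndm : (i :: (U ++ stk)).Nodup := List.nodup_middle.1 hnd
  obtain ⟨hiUS, hndUS⟩ := List.nodup_cons.1 hndm
  have hUstk := List.nodup_append.1 hndUS
  refine ⟨?_, ?_, ?_, ?_⟩
  · -- Nodup ((i :: U) ++ ((chSpec toc i).reverse ++ stk))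
    refine List.nodup_append.2 ⟨?_, ?_, ?_⟩
    · exact List.nodup_cons.2 ⟨fun h => hiUS (List.mem_append.2 (Or.inl h)), hUstk.1⟩
    · refine List.nodup_append.2 ⟨List.nodup_reverse.2 (nodup_chSpec toc i), hUstk.2.1, ?_⟩
      intro c hc b hb heq
      exact (hfresh c (List.mem_reverse.1 hc)).2 (heq ▸ hb)
    · intro x hx b hb heq
      subst heq
      rcases List.mem_append.1 hb with hk | hs
      · exact (hfresh x (List.mem_reverse.1 hk)).1 hx
      · rcases List.mem_cons.1 hx with rfl | hxU
        · exact hiUS (List.mem_append.2 (Or.inr hs))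
        · exact hUstk.2.2 x hxU x hs rfl
  · intro x hx
    rcases List.mem_append.1 hx with hx | hx
    · rcases List.mem_cons.1 hx with rfl | hxU
      · exact hb x (List.mem_append.2 (Or.inr List.mem_cons_self))
      · exact hb x (List.mem_append.2 (Or.inl hxU))
    · rcases List.mem_append.1 hx with hk | hs
      · exact (mem_chSpec.1 (List.mem_reverse.1 hk)).1
      · exact hb x (List.mem_append.2 (Or.inr (List.mem_cons.2 (Or.inr hs))))
  · exact ⟨hJS i List.mem_cons_self, hJU⟩
  · intro s hs
    rcases List.mem_append.1 hs with hk | hstk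
    · exact Or.inr ⟨i, List.mem_cons_self, (mem_chSpec.1 (List.mem_reverse.1 hk)).2⟩
    · rcases hJS s (List.mem_cons.2 (Or.inr hstk)) with h | ⟨q, hq, hsq⟩
      · exact Or.inl h
      · exact Or.inr ⟨q, List.mem_cons.2 (Or.inr hq), hsq⟩

theorem resolveB_succ (kids : Int → List Int) (f : Nat) (i : Int) (eff : List (Option Int)) :
    pvResolveB kids (f+1) i eff =
      (let eff1 := (kids i).foldl (fun e c => pvResolveB kids f c e) eff
       match PySem.List.pyGet? eff1 i with
       | some (some _) => eff1
       | _ => match pvFirstB eff1 (kids i) with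
         | some v => PySem.List.pySetD eff1 i (some v)
         | none => eff1) := rfl

theorem crux {toc : List (List (String × Option Int))} (hP : PreP toc) :
    ∀ (f : Nat) (S U : List Int) (eff : List (Option Int)),
      StackInv toc S U → toc.length + 1 ≤ f + U.length →
      ((pvDFSA (fun k => chSpec toc k) f S []).reverse).foldl
          (fun e i => pvFillA (fun k => chSpec toc k) e i) eff
        = (S.reverse).foldl (fun e s => pvResolveB (fun k => chSpec toc k) (toc.length + 1) s e) eff := by
  intro f
  induction f with
  | zero =>
    intro S U eff hInv hf
    obtain ⟨hnd, hb, _, _⟩ := hInv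
    have hU := ulen_le (List.nodup_append.1 hnd).1
      (fun x hx => hb x (List.mem_append.2 (Or.inl hx)))
    omega
  | succ f ih =>
    intro S U eff hInv hf
    cases S with
    | nil => simp [pvDFSA]
    | cons i stk =>
      obtain ⟨C, hC⟩ := chain_exists U hInv.2.2.1 i (hInv.2.2.2 i List.mem_cons_self)
      have hib : 0 ≤ i ∧ i < (toc.length : Int) :=
        hInv.2.1 i (List.mem_append.2 (Or.inr List.mem_cons_self))
      simp only [pvDFSA]
      rw [dfsA_acc]
      have hIH := ih ((chSpec toc i).reverse ++ stk) (i :: U) eff (inv_step hInv) (by simp; omega)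
      rw [List.reverse_append, List.reverse_cons, List.nil_append, List.foldl_append,
          List.foldl_append, List.foldl_cons, List.foldl_nil, hIH,
          List.reverse_append, List.reverse_reverse, List.reverse_cons, List.foldl_append,
          List.foldl_append, List.foldl_cons, List.foldl_nil]
      set E := stk.reverse.foldl (fun e s => pvResolveB (fun k => chSpec toc k) (toc.length + 1) s e) eff with hE
      -- RHS head step: resolve with fuel n+1 at i on E
      show pvFillA (fun k => chSpec toc k)
          ((chSpec toc i).foldl (fun e c => pvResolveB (fun k => chSpec toc k) (toc.length + 1) c e) E) i
        = pvResolveB (fun k => chSpec toc k) (toc.length + 1) i E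
      rw [resolveB_succ]
      have hfold : (chSpec toc i).foldl (fun e c => pvResolveB (fun k => chSpec toc k) toc.length c e) E
          = (chSpec toc i).foldl (fun e c => pvResolveB (fun k => chSpec toc k) (toc.length + 1) c e) E := by
        refine PySem.List.foldl_congr_mem _ _ _ _ ?_
        intro e c hc
        have hm := mem_chSpec.1 hc
        exact resolve_fuel hP toc.length (toc.length + 1) c (i :: C) e ⟨hm.2, hC⟩ hm.1
          (by omega) (by omega)
      simp only [hfold]
      unfold pvFillA
      cases hg : PySem.List.pyGet?
          ((chSpec toc i).foldl (fun e c => pvResolveB (fun k => chSpec toc k) (toc.length + 1) c e) E) i with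
      | none => rw [fillScan_eq]
      | some v =>
        cases v with
        | none => rw [fillScan_eq]
        | some w => rfl

-- ===== VERDICT (by name: the statement is the Claim_ definition above) =====
theorem build_effective_page_map_spec : Claim_equal_build_effective_page_map := by
  intro toc dpm _hDom hPre
  unfold Spec_build_effective_page_map
  obtain ⟨hP, _hlen⟩ := hPre
  unfold build_effective_page_map build_effective_page_map_alt
  rw [childA_eq, rootsA_eq, scanB_eq]
  have hInv : StackInv toc (rootsSpec toc).reverse [] := by
    refine ⟨?_, ?_, trivial, ?_⟩
    · exact List.nodup_reverse.mpr (nodup_rootsSpec toc)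
    · intro x hx
      simp only [List.nil_append, List.mem_reverse] at hx
      exact (mem_rootsSpec.1 hx).1
    · intro s hs
      exact Or.inl (mem_rootsSpec.1 (List.mem_reverse.1 hs)).2
  have := crux hP (toc.length + 1) (rootsSpec toc).reverse [] dpm hInv (by simp)
  simpa using this
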